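-- pv_equiv track=rewrite | github.com/Gaius-Augustus/BRAKER | scripts/stringtie2utr.py | find_matching_transcripts
-- ===== SOURCE A (Python) =====
-- def find_matching_transcripts(intron_hash1, intron_hash2):
--     """
--     Find matching transcript IDs based on intron patterns.
--
--     Args:
--     - intron_hash1 (dict): Dictionary with intron strings as keys and transcript IDs from the first dataset as values.
--     - intron_hash2 (dict): Dictionary with intron strings as keys and transcript IDs from the second dataset as values.
--
--     Returns:
--     dict: Dictionary with transcript IDs from intron_hash1 as keys and lists of matching transcript IDs from intron_hash2 as values.
--     """
--
--     # Reverse the hashes for easy lookup of intron patterns for each transcript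
--     reverse_hash1 = {}
--     for intron, transcript in intron_hash1.items():
--         if transcript not in reverse_hash1:
--             reverse_hash1[transcript] = []
--         reverse_hash1[transcript].append(intron)
--
--     reverse_hash2 = {}
--     for intron, transcript in intron_hash2.items():
--         if transcript not in reverse_hash2:
--             reverse_hash2[transcript] = []
--         reverse_hash2[transcript].append(intron)
--
--     matching_transcripts = {}
--
--     for transcript1, introns1 in reverse_hash1.items():
--         matches = set()
--
--         for transcript2, introns2 in reverse_hash2.items():
--             if all(intron in introns2 for intron in introns1):
--                 matches.add(transcript2)
--
--         if matches:
--             matching_transcripts[transcript1] = list(matches)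
--
--     return matching_transcripts
-- ===== SOURCE B (Python) =====
-- def find_matching_transcripts(intron_hash1, intron_hash2):
--     # One pass with O(1) dict lookups instead of the quadratic transcript x transcript
--     # subset scan: since intron_hash2 maps each intron to a SINGLE transcript, a
--     # transcript1 matches exactly the one transcript2 that all of its introns map to.
--     groups = {}
--     for intron, transcript in intron_hash1.items():
--         groups.setdefault(transcript, []).append(intron)
--     matching_transcripts = {}
--     for transcript1, introns in groups.items():
--         target = None
--         ok = True
--         for intron in introns:
--             t2 = intron_hash2.get(intron)
--             if t2 is None or (target is not None and t2 != target):
--                 ok = False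
--                 break
--             target = t2
--         if ok and target is not None:
--             matching_transcripts[transcript1] = [target]
--     return matching_transcripts
-- ===== Notes on version B (the rewrite author's own statement) =====
-- stated objective: faster
-- what changed: A groups both dicts by transcript and then, for every transcript1, scans every transcript2 bucket testing intron-subset inclusion; B exploits that each intron of intron_hash2 names a single transcript, so one pass of O(1) dict lookups over transcript1's introns finds the unique possible match directly, with no scan over transcript2 buckets.
import Mathlib
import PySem

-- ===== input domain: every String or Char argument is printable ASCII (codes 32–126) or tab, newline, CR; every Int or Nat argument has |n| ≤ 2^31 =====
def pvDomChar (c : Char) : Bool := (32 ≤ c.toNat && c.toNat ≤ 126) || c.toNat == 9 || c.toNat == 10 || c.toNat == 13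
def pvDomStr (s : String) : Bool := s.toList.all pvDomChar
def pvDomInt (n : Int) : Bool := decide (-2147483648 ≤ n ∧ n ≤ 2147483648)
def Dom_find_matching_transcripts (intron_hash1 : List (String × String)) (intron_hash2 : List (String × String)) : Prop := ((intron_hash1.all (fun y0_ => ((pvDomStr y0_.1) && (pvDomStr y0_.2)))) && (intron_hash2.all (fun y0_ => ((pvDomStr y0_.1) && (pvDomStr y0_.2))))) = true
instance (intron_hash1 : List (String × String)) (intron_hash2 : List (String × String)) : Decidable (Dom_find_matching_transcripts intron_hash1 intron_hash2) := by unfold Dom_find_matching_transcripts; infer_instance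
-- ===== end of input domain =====

-- B replaces A's quadratic transcript-by-transcript subset scan with one pass of
-- O(1) dict lookups per intron (each intron of intron_hash2 names a single transcript);
-- timed faster only if the check reports it. Equivalence is about the return value.


-- ===== PORT A =====
-- Literal port of A. `list(matches)` is ported as the PySem.Set's element list; the
-- result cannot depend on Python's set-iteration order because `matches` never holds
-- more than one element (each intron of intron_hash2 belongs to a single transcript2,
-- and introns1 is nonempty) — this is proved, not assumed, in the lemmas below.
def find_matching_transcripts (intron_hash1 : List (String × String)) (intron_hash2 : List (String × String)) : List (String × List String) :=
  let reverse_hash1 : PySem.Dict String (List String) :=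
    (PySem.Dict.ofList intron_hash1).items.foldl
      (fun d p => d.modify p.2 [] (fun l => l ++ [p.1])) PySem.Dict.empty
  let reverse_hash2 : PySem.Dict String (List String) :=
    (PySem.Dict.ofList intron_hash2).items.foldl
      (fun d p => d.modify p.2 [] (fun l => l ++ [p.1])) PySem.Dict.empty
  let matching_transcripts : PySem.Dict String (List String) :=
    reverse_hash1.items.foldl (fun out p =>
      let matchesSet : PySem.Set String :=
        reverse_hash2.items.foldl (fun m q =>
          if p.2.all (fun intron => q.2.contains intron) then PySem.Set.add m q.1 else m)
          PySem.Set.empty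
      if matchesSet.isEmpty then out else out.insert p.1 matchesSet) PySem.Dict.empty
  matching_transcripts.items

-- ===== PORT B =====
-- Port of Source B's inner loop (`for intron in introns: … break`): break becomes recursion.
def pyCommonTarget (d2 : PySem.Dict String String) (target : Option String) : List String → Option String
  | [] => target
  | intron :: rest =>
    match d2.get? intron, target with
    | none, _ => none
    | some t2, none => pyCommonTarget d2 (some t2) rest
    | some t2, some t => if t2 = t then pyCommonTarget d2 (some t) rest else none

def find_matching_transcripts_alt (intron_hash1 : List (String × String)) (intron_hash2 : List (String × String)) : List (String × List String) :=
  let groups : PySem.Dict String (List String) :=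
    (PySem.Dict.ofList intron_hash1).items.foldl
      (fun d p => d.modify p.2 [] (fun l => l ++ [p.1])) PySem.Dict.empty
  let d2 := PySem.Dict.ofList intron_hash2
  let matching_transcripts : PySem.Dict String (List String) :=
    groups.items.foldl (fun out p =>
      match pyCommonTarget d2 none p.2 with
      | some t => out.insert p.1 [t]
      | none => out) PySem.Dict.empty
  matching_transcripts.items

-- ===== PRECONDITION & SPEC =====
def Spec_find_matching_transcripts (intron_hash1 : List (String × String)) (intron_hash2 : List (String × String)) (out : List (String × List String)) : Prop := out = find_matching_transcripts_alt intron_hash1 intron_hash2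
instance (intron_hash1 : List (String × String)) (intron_hash2 : List (String × String)) (out : List (String × List String)) : Decidable (Spec_find_matching_transcripts intron_hash1 intron_hash2 out) := by unfold Spec_find_matching_transcripts; infer_instance

-- ===== CLAIM (what is proved, stated in full; the proofs are below) =====
def Claim_equal_find_matching_transcripts : Prop := ∀ (intron_hash1 : List (String × String)) (intron_hash2 : List (String × String)), Dom_find_matching_transcripts intron_hash1 intron_hash2 → Spec_find_matching_transcripts intron_hash1 intron_hash2 (find_matching_transcripts intron_hash1 intron_hash2)

-- ===== LEMMAS AND PROOFS =====

-- the reverse hash built by both Pythons' grouping loop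
def revHash (items : List (String × String)) : PySem.Dict String (List String) :=
  items.foldl (fun d p => d.modify p.2 [] (fun l => l ++ [p.1])) PySem.Dict.empty

lemma revHash_eq_foldl_swap (items : List (String × String)) :
    revHash items
      = (items.map (fun p => (p.2, p.1))).foldl
          (fun d q => d.modify q.1 [] (fun l => l ++ [q.2])) PySem.Dict.empty := by
  rw [List.foldl_map]; rfl

lemma revHash_getD (items : List (String × String)) (c : String) :
    (revHash items).getD c [] = (items.filter (fun p => p.2 == c)).map (·.1) := by
  rw [revHash_eq_foldl_swap, PySem.Dict.getD_foldl_modify_append]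
  simp [List.filter_map, Function.comp_def]

lemma revHash_keys (items : List (String × String)) :
    (revHash items).keys = PySem.Set.ofList (items.map (·.2)) := by
  unfold revHash
  rw [PySem.Dict.keys_foldl_modify_key items (·.2) [] (fun _ p => fun l => l ++ [p.1])]
  rw [PySem.Dict.keys_empty, PySem.Set.update_nil_left]

lemma revHash_nodup_keys (items : List (String × String)) :
    (revHash items).keys.Nodup := by
  rw [revHash_keys]; exact PySem.Set.nodup_ofList _

lemma revHash_val_ne_nil (items : List (String × String)) (p : String × List String)
    (hp : p ∈ (revHash items).items) : p.2 ≠ [] := by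
  have hk : p.1 ∈ (revHash items).keys := PySem.Dict.mem_keys_of_mem_items _ hp
  have hv : (revHash items).getD p.1 [] = p.2 :=
    PySem.Dict.getD_of_mem_items _ hp (revHash_nodup_keys items) []
  rw [revHash_keys, PySem.Set.mem_ofList] at hk
  rcases List.mem_map.mp hk with ⟨r, hr, hr2⟩
  rw [revHash_getD] at hv
  intro hnil
  rw [hnil] at hv
  have : r ∈ items.filter (fun q => q.2 == p.1) :=
    List.mem_filter.mpr ⟨hr, by simp [hr2]⟩
  simp [List.map_eq_nil_iff.mp hv] at this

-- membership in a reverse-hash bucket is a single dict lookup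
lemma mem_revHash_getD (d2 : PySem.Dict String String) (hnd : d2.keys.Nodup)
    (c i : String) : i ∈ (revHash d2.items).getD c [] ↔ d2.get? i = some c := by
  rw [revHash_getD, PySem.Dict.get?_eq_some_iff_mem_items _ _ _ hnd]
  constructor
  · intro h
    rcases List.mem_map.mp h with ⟨r, hr, hr1⟩
    rcases List.mem_filter.mp hr with ⟨hrm, hrc⟩
    have h2 : r.2 = c := by simpa using hrc
    have hric : r = (i, c) := by cases r; simp_all
    exact hric ▸ hrm
  · intro h
    exact List.mem_map.mpr ⟨(i, c), List.mem_filter.mpr ⟨h, by simp⟩, rfl⟩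

-- soundness of B's loop
lemma ct_sound_some (d2 : PySem.Dict String String) (v : String) (l : List String) (t : String)
    (h : pyCommonTarget d2 (some v) l = some t) :
    v = t ∧ ∀ i ∈ l, d2.get? i = some t := by
  induction l generalizing v with
  | nil => simp only [pyCommonTarget, Option.some.injEq] at h; simp [h]
  | cons i r ih =>
    cases hg : d2.get? i with
    | none => simp only [pyCommonTarget, hg] at h; simp at h
    | some t2 =>
      simp only [pyCommonTarget, hg] at h
      by_cases ht : t2 = v
      · rw [if_pos ht] at h
        obtain ⟨hv, hall⟩ := ih v h
        refine ⟨hv, fun j hj => ?_⟩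
        rcases List.mem_cons.mp hj with hj | hj
        · rw [hj, hg, ht, hv]
        · exact hall j hj
      · rw [if_neg ht] at h; simp at h

-- completeness of B's loop
lemma ct_complete (d2 : PySem.Dict String String) (t : String) (l : List String)
    (h : ∀ i ∈ l, d2.get? i = some t) : pyCommonTarget d2 (some t) l = some t := by
  induction l with
  | nil => rfl
  | cons i r ih =>
    have hg : d2.get? i = some t := h i (List.mem_cons_self ..)
    simp only [pyCommonTarget, hg]
    exact ih (fun j hj => h j (List.mem_cons_of_mem _ hj))

lemma ct_none_some (d2 : PySem.Dict String String) (i : String) (r : List String) (t : String) :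
    pyCommonTarget d2 none (i :: r) = some t ↔ ∀ j ∈ i :: r, d2.get? j = some t := by
  constructor
  · intro h
    cases hg : d2.get? i with
    | none => simp only [pyCommonTarget, hg] at h; simp at h
    | some t2 =>
      simp only [pyCommonTarget, hg] at h
      obtain ⟨ht2, hall⟩ := ct_sound_some d2 t2 r t h
      intro j hj
      rcases List.mem_cons.mp hj with hj | hj
      · rw [hj, hg, ht2]
      · exact hall j hj
  · intro h
    have hg : d2.get? i = some t := h i (List.mem_cons_self ..)
    simp only [pyCommonTarget, hg]
    exact ct_complete d2 t r (fun j hj => h j (List.mem_cons_of_mem _ hj))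

-- the A-side inner fold when the condition is false on every element
lemma fold_add_false (l : List (String × List String)) (cond : String × List String → Prop)
    [DecidablePred cond] (h : ∀ q ∈ l, ¬ cond q) (s : PySem.Set String) :
    l.foldl (fun m q => if cond q then PySem.Set.add m q.1 else m) s = s := by
  induction l generalizing s with
  | nil => rfl
  | cons q r ih =>
    rw [List.foldl_cons, if_neg (h q (List.mem_cons_self ..))]
    exact ih (fun q' hq' => h q' (List.mem_cons_of_mem _ hq')) s

-- the A-side inner fold over a nodup-keyed list, condition "key = t"
lemma fold_add_key_eq (l : List (String × List String)) (t : String)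
    (hnd : (l.map (·.1)).Nodup) (s : PySem.Set String) (hs : t ∉ s) :
    l.foldl (fun m q => if q.1 = t then PySem.Set.add m q.1 else m) s
      = if t ∈ l.map (·.1) then s ++ [t] else s := by
  induction l generalizing s with
  | nil => simp
  | cons q r ih =>
    simp only [List.map_cons, List.nodup_cons] at hnd
    rw [List.foldl_cons]
    by_cases hq : q.1 = t
    · rw [if_pos hq, PySem.Set.add_of_not_mem (hq ▸ hs), hq]
      rw [fold_add_false r (fun q' => q'.1 = t)
        (fun q' hq' hc => hnd.1 (List.mem_map.mpr ⟨q', hq', hc.trans hq.symm⟩))]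
      simp [hq]
    · rw [if_neg hq, ih hnd.2 s hs]
      have ht : ¬ t = q.1 := fun h => hq h.symm
      by_cases hm : t ∈ List.map (fun x => x.1) r
      · simp [hm, List.mem_cons]
      · simp [hm, ht, List.mem_cons]

-- the core: A's inner scan over all transcript2 buckets equals B's lookup loop
lemma matches_eq (d2 : PySem.Dict String String) (hnd : d2.keys.Nodup)
    (l : List String) (hl : l ≠ []) :
    (revHash d2.items).items.foldl
        (fun m q => if l.all (fun intron => q.2.contains intron) then PySem.Set.add m q.1 else m)
        PySem.Set.empty
      = (match pyCommonTarget d2 none l with | some t => [t] | none => []) := by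
  obtain ⟨i0, r, rfl⟩ := List.exists_cons_of_ne_nil hl
  have hbucket : ∀ q ∈ (revHash d2.items).items, ∀ i, (q.2.contains i = true) ↔ d2.get? i = some q.1 := by
    intro q hq i
    have hv : (revHash d2.items).getD q.1 [] = q.2 :=
      PySem.Dict.getD_of_mem_items _ (by exact hq) (revHash_nodup_keys _) []
    rw [List.contains_iff_mem, ← hv, mem_revHash_getD d2 hnd]
  have hcond : ∀ q ∈ (revHash d2.items).items,
      ((i0 :: r).all (fun intron => q.2.contains intron) = true)
        ↔ ∀ i ∈ i0 :: r, d2.get? i = some q.1 := by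
    intro q hq
    rw [List.all_eq_true]
    exact ⟨fun h i hi => (hbucket q hq i).mp (h i hi),
           fun h i hi => (hbucket q hq i).mpr (h i hi)⟩
  cases hct : pyCommonTarget d2 none (i0 :: r) with
  | none =>
    rw [fold_add_false _ (fun q => (i0 :: r).all (fun intron => q.2.contains intron) = true) ?_ _]
    · rfl
    · intro q hq hc
      exact (Option.some_ne_none q.1)
        ((((ct_none_some d2 i0 r q.1).mpr ((hcond q hq).mp hc)).symm).trans hct)
  | some t =>
    have hall : ∀ j ∈ i0 :: r, d2.get? j = some t := (ct_none_some d2 i0 r t).mp hct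
    rw [PySem.List.foldl_congr_mem _ _ (fun m q => if q.1 = t then PySem.Set.add m q.1 else m) _ ?_]
    · rw [fold_add_key_eq _ t (revHash_nodup_keys d2.items) PySem.Set.empty (by simp [PySem.Set.empty])]
      have ht : t ∈ (revHash d2.items).items.map (·.1) := by
        have : (i0, t) ∈ d2.items :=
          (PySem.Dict.get?_eq_some_iff_mem_items _ _ _ hnd).mp (hall i0 (List.mem_cons_self ..))
        have : t ∈ (revHash d2.items).keys := by
          rw [revHash_keys, PySem.Set.mem_ofList]
          exact List.mem_map.mpr ⟨(i0, t), this, rfl⟩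
        exact this
      simp [ht]
    · intro m q hq
      have hiff : (((i0 :: r).all fun intron => q.2.contains intron) = true) ↔ q.1 = t := by
        rw [hcond q hq]
        constructor
        · intro h
          have h1 := h i0 (List.mem_cons_self ..)
          rw [hall i0 (List.mem_cons_self ..)] at h1
          exact (Option.some_inj.mp h1).symm
        · intro h i hi; rw [h]; exact hall i hi
      show (if ((i0 :: r).all fun intron => q.2.contains intron) = true then PySem.Set.add m q.1 else m)
            = if q.1 = t then PySem.Set.add m q.1 else m
      by_cases hqt : q.1 = t
      · rw [if_pos (hiff.mpr hqt), if_pos hqt]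
      · rw [if_neg (fun hc => hqt (hiff.mp hc)), if_neg hqt]

-- per-element equality of the two output-building steps
lemma step_eq (d2 : PySem.Dict String String) (hnd : d2.keys.Nodup)
    (out : PySem.Dict String (List String)) (p : String × List String) (hp : p.2 ≠ []) :
    (let matchesSet : PySem.Set String :=
        (revHash d2.items).items.foldl
          (fun m q => if p.2.all (fun intron => q.2.contains intron) then PySem.Set.add m q.1 else m)
          PySem.Set.empty
      if matchesSet.isEmpty then out else out.insert p.1 matchesSet)
      = (match pyCommonTarget d2 none p.2 with
         | some t => out.insert p.1 [t]
         | none => out) := by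
  simp only [matches_eq d2 hnd p.2 hp]
  cases pyCommonTarget d2 none p.2 with
  | none => rfl
  | some t => rfl

-- ===== VERDICT (by name: the statement is the Claim_ definition above) =====
theorem find_matching_transcripts_spec : Claim_equal_find_matching_transcripts := by
  unfold Claim_equal_find_matching_transcripts Spec_find_matching_transcripts
  intro h1 h2 _
  unfold find_matching_transcripts find_matching_transcripts_alt
  dsimp only
  congr 1
  apply PySem.List.foldl_congr_mem
  intro out p hp
  have hp2 : p.2 ≠ [] := revHash_val_ne_nil (PySem.Dict.ofList h1).items p hp
  exact step_eq (PySem.Dict.ofList h2) (PySem.Dict.nodup_keys_ofList h2) out p hp2
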